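-- pv_equiv track=rewrite | github.com/gruenewald-lab/CGsmiles | cgsmiles/fingerprint.py | _decode_bead
-- ===== SOURCE A (Python) =====
-- def _decode_bead(bead):
--     if bead[-1] in ['A', 'B', 'C', 'D', 'E']:
--         bead = bead[:-1]
--     if bead.startswith('T') or bead.startswith('S'):
--         size = bead[0]
--         bead = bead[1:]
--     else:
--         size = 'R'
--
--     polarity = ""
--     labels = {"r": False, "h": False, "e": False, "v": False, "d": False, "a": False}
--     for token in bead[::-1]:
--         if token in labels:
--             labels[token] = True
--         else:
--             polarity += token
--     return size, polarity[::-1], labels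
-- ===== SOURCE B (Python) =====
-- def _decode_bead(bead):
--     if bead[-1] in ['A', 'B', 'C', 'D', 'E']:
--         bead = bead[:-1]
--     if bead[:1] in ('T', 'S'):
--         size, bead = bead[0], bead[1:]
--     else:
--         size = 'R'
--     label_keys = ('r', 'h', 'e', 'v', 'd', 'a')
--     labels = {k: (k in bead) for k in label_keys}
--     polarity = ''.join(t for t in bead if t not in label_keys)
--     return size, polarity, labels
-- ===== Notes on version B (the rewrite author's own statement) =====
-- stated objective: simpler
-- what changed: A's single reversed scan with a mutable dict and string accumulation is replaced by a per-key membership dict comprehension plus a forward filter join for the polarity.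
-- outside the precondition, e.g. on _decode_bead(''): A raises IndexError, B raises IndexError
import Mathlib
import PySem

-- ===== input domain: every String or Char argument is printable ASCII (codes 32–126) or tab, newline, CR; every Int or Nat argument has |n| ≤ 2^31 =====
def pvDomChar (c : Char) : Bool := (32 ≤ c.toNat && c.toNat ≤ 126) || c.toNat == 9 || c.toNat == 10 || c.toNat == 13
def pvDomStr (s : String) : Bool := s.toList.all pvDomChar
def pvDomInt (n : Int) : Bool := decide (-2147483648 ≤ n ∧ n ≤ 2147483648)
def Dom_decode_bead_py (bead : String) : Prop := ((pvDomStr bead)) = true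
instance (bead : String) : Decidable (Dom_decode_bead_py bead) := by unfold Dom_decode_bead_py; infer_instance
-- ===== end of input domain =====

-- B replaces A's single reversed accumulating scan (mutable dict + string concat) by one
-- membership test per fixed label key plus a forward filter for the polarity (objective: simpler).

-- ===== PORT A =====
-- A's loop body: if token in labels: labels[token] = True else polarity += token
def decodeBeadStepA (st : List Char × PySem.Dict String Bool) (token : Char) :
    List Char × PySem.Dict String Bool :=
  if st.2.contains (String.singleton token) then
    (st.1, st.2.insert (String.singleton token) true)
  else
    (st.1 ++ [token], st.2)

def decode_bead_py (bead : String) : String × String × (List (String × Bool)) :=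
  match PySem.Str.pyGet? bead (-1) with
  | none => ("", "", [])   -- bead[-1] raises IndexError on ""; excluded by Pre_
  | some last =>
    let cs : List Char :=
      if (["A", "B", "C", "D", "E"] : List String).contains (String.singleton last) then
        bead.toList.dropLast   -- bead[:-1]
      else bead.toList
    let (size, cs) :=
      if PySem.Chars.startswith cs ['T'] || PySem.Chars.startswith cs ['S'] then
        (String.singleton (cs.headD ' '), cs.drop 1)   -- bead[0], bead[1:]; guard ⇒ cs ≠ []
      else ("R", cs)
    let labels0 : PySem.Dict String Bool :=
      PySem.Dict.ofList [("r", false), ("h", false), ("e", false), ("v", false), ("d", false), ("a", false)]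
    let (pol, labels) := cs.reverse.foldl decodeBeadStepA ([], labels0)   -- for token in bead[::-1]
    (size, String.ofList pol.reverse, labels.items)

-- ===== PORT B =====
def decodeBeadLabelKeys : List Char := ['r', 'h', 'e', 'v', 'd', 'a']

def decode_bead_py_alt (bead : String) : String × String × (List (String × Bool)) :=
  match PySem.Str.pyGet? bead (-1) with
  | none => ("", "", [])   -- bead[-1] raises IndexError on ""; excluded by Pre_
  | some last =>
    let cs : List Char :=
      if (["A", "B", "C", "D", "E"] : List String).contains (String.singleton last) then
        bead.toList.dropLast
      else bead.toList
    let (size, cs) :=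
      if (PySem.List.slice cs none (some 1)) ∈ ([['T'], ['S']] : List (List Char)) then
        (String.singleton (cs.headD ' '), cs.drop 1)
      else ("R", cs)
    let labels : List (String × Bool) :=
      decodeBeadLabelKeys.map (fun k => (String.singleton k, cs.contains k))
    let polarity : String := String.ofList (cs.filter (fun t => !decodeBeadLabelKeys.contains t))
    (size, polarity, labels)

-- ===== PRECONDITION & SPEC =====
-- A evaluates bead[-1], which raises IndexError on the empty string.
def Pre_decode_bead_py (bead : String) : Prop := bead ≠ ""
instance (bead : String) : Decidable (Pre_decode_bead_py bead) := by unfold Pre_decode_bead_py; infer_instance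
def pvWitness_decode_bead_py : String := "SP1r"

def Spec_decode_bead_py (bead : String) (out : String × String × (List (String × Bool))) : Prop := out = decode_bead_py_alt bead
instance (bead : String) (out : String × String × (List (String × Bool))) : Decidable (Spec_decode_bead_py bead out) := by unfold Spec_decode_bead_py; infer_instance

-- ===== CLAIM (what is proved, stated in full; the proofs are below) =====
def Claim_equal_decode_bead_py : Prop := ∀ (bead : String), Dom_decode_bead_py bead → Pre_decode_bead_py bead → Spec_decode_bead_py bead (decode_bead_py bead)


lemma singleton_eq_singleton_iff (t c : Char) : String.singleton t = String.singleton c ↔ t = c := by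
  constructor
  · intro h; have := congrArg String.toList h; simpa using this
  · intro h; rw [h]

def decodeBeadLabels0 : PySem.Dict String Bool :=
  PySem.Dict.ofList [("r", false), ("h", false), ("e", false), ("v", false), ("d", false), ("a", false)]

lemma keys0_eq : decodeBeadLabels0.keys = decodeBeadLabelKeys.map String.singleton := by decide

lemma mem_keys_iff (t : Char) (d : PySem.Dict String Bool)
    (hk : d.keys = decodeBeadLabelKeys.map String.singleton) :
    d.contains (String.singleton t) = true ↔ t ∈ decodeBeadLabelKeys := by
  rw [PySem.Dict.contains_iff_mem_keys, hk, List.mem_map]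
  constructor
  · rintro ⟨c, hc, he⟩; rw [(singleton_eq_singleton_iff c t).mp he] at hc; exact hc
  · intro h; exact ⟨t, h, rfl⟩

lemma foldA_spec (l : List Char) (p : List Char) (d : PySem.Dict String Bool)
    (hk : d.keys = decodeBeadLabelKeys.map String.singleton) :
    (l.foldl decodeBeadStepA (p, d)).1 = p ++ l.filter (fun t => !decodeBeadLabelKeys.contains t)
  ∧ (l.foldl decodeBeadStepA (p, d)).2.keys = decodeBeadLabelKeys.map String.singleton
  ∧ ∀ c ∈ decodeBeadLabelKeys, (l.foldl decodeBeadStepA (p, d)).2.getD (String.singleton c) false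
        = (d.getD (String.singleton c) false || l.any (fun t => t == c)) := by
  induction l generalizing p d with
  | nil => simpa using hk
  | cons t l ih =>
    by_cases hc : d.contains (String.singleton t) = true
    · have ht : t ∈ decodeBeadLabelKeys := (mem_keys_iff t d hk).mp hc
      have hk' : (d.insert (String.singleton t) true).keys = decodeBeadLabelKeys.map String.singleton := by
        rw [PySem.Dict.keys_insert_of_contains, hk]
        exact hc
      have step : decodeBeadStepA (p, d) t = (p, d.insert (String.singleton t) true) := by
        simp [decodeBeadStepA, hc]
      obtain ⟨h1, h2, h3⟩ := ih p (d.insert (String.singleton t) true) hk'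
      refine ⟨?_, ?_, ?_⟩
      · rw [List.foldl_cons, step, h1]
        simp [ht]
      · rw [List.foldl_cons, step]; exact h2
      · intro c hcmem
        rw [List.foldl_cons, step, h3 c hcmem]
        by_cases he : t = c
        · subst he
          rw [PySem.Dict.getD_insert_self]
          simp
        · rw [PySem.Dict.getD_insert_of_ne]
          · have hbf : (t == c) = false := by simpa using he
            rw [List.any_cons, hbf]; simp
          · intro h; exact he ((singleton_eq_singleton_iff c t).mp h).symm
    · have ht : t ∉ decodeBeadLabelKeys := fun h => hc ((mem_keys_iff t d hk).mpr h)
      have step : decodeBeadStepA (p, d) t = (p ++ [t], d) := by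
        simp [decodeBeadStepA, hc]
      obtain ⟨h1, h2, h3⟩ := ih (p ++ [t]) d hk
      refine ⟨?_, ?_, ?_⟩
      · rw [List.foldl_cons, step, h1]
        simp [ht]
      · rw [List.foldl_cons, step]; exact h2
      · intro c hcmem
        rw [List.foldl_cons, step, h3 c hcmem]
        have hne : t ≠ c := fun h => ht (h ▸ hcmem)
        have hbf : (t == c) = false := by simpa using hne
        rw [List.any_cons, hbf]; simp

lemma nodup_mapped_keys : (decodeBeadLabelKeys.map String.singleton).Nodup := by decide

lemma any_beq_eq_contains (l : List Char) (c : Char) : (l.any fun t => t == c) = l.contains c := by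
  by_cases h : c ∈ l <;> simp [h, List.any_eq_true, beq_iff_eq]
  exact fun x hx hxc => h (hxc ▸ hx)

lemma getD0_eq (c : Char) (h : c ∈ decodeBeadLabelKeys) :
    decodeBeadLabels0.getD (String.singleton c) false = false := by
  fin_cases h <;> decide

lemma tail_eq (cs : List Char) :
    (String.ofList ((cs.reverse.foldl decodeBeadStepA ([], decodeBeadLabels0)).1).reverse,
     ((cs.reverse.foldl decodeBeadStepA ([], decodeBeadLabels0)).2).items)
  = (String.ofList (cs.filter (fun t => !decodeBeadLabelKeys.contains t)),
     decodeBeadLabelKeys.map (fun k => (String.singleton k, cs.contains k))) := by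
  obtain ⟨h1, h2, h3⟩ := foldA_spec cs.reverse [] decodeBeadLabels0 keys0_eq
  refine Prod.ext ?_ ?_
  · show String.ofList _ = _
    rw [h1]
    simp [List.filter_reverse]
  · dsimp only
    rw [PySem.Dict.items_eq_map_keys _ (h2 ▸ nodup_mapped_keys) false, h2, List.map_map]
    refine List.map_congr_left ?_
    intro c hc
    simp only [Function.comp]
    rw [h3 c hc]
    simp [any_beq_eq_contains, getD0_eq c hc]

lemma guard_eq (cs : List Char) :
    (PySem.Chars.startswith cs ['T'] || PySem.Chars.startswith cs ['S'])
    = decide ((PySem.List.slice cs none (some 1)) ∈ ([['T'], ['S']] : List (List Char))) := by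
  cases cs with
  | nil => decide
  | cons a l =>
    rw [show PySem.List.slice (a :: l) none (some 1) = (a :: l).take (1 : Int).toNat from PySem.List.slice_to (a :: l) (by norm_num)]
    by_cases hT : a = 'T' <;> by_cases hS : a = 'S' <;>
      simp [PySem.Chars.startswith, hT, hS, List.take, List.isPrefixOf]
    exact ⟨fun h => hT h.symm, fun h => hS h.symm⟩

-- ===== VERDICT (by name: the statement is the Claim_ definition above) =====
theorem decode_bead_py_spec : Claim_equal_decode_bead_py := by
  intro bead hdom hpre
  unfold Spec_decode_bead_py decode_bead_py decode_bead_py_alt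
  cases h : PySem.Str.pyGet? bead (-1) with
  | none => rfl
  | some last =>
    dsimp only
    rw [guard_eq]
    by_cases hg : PySem.List.slice
        (if (["A", "B", "C", "D", "E"] : List String).contains (String.singleton last) then
          bead.toList.dropLast else bead.toList) none (some 1) ∈ ([['T'], ['S']] : List (List Char)) <;>
      simp only [hg, decide_true, decide_false, if_true, if_false] <;>
      exact congrArg _ (tail_eq _)
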